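-- pv_equiv track=rewrite | github.com/silaspassosf/pjeplus | Triagem/runner.py | _tem_alerta_docs_pessoais
-- ===== SOURCE A (Python) =====
-- def _tem_alerta_docs_pessoais(triagem_txt: str) -> bool:
--     """Verifica alerta de documentos essenciais faltando na seção [Alertas]."""
--     if not isinstance(triagem_txt, str):
--         return False
--     in_alertas = False
--     for linha in triagem_txt.splitlines():
--         s = linha.strip()
--         if s == "[Alertas]":
--             in_alertas = True
--             continue
--         if s.startswith("[") and s.endswith("]") and s != "[Alertas]":
--             in_alertas = False
--         if in_alertas and "documentos essenciais" in s.lower():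
--             return True
--     return False
-- ===== SOURCE B (Python) =====
-- def _tem_alerta_docs_pessoais(triagem_txt: str) -> bool:
--     """Verifica alerta de documentos essenciais faltando na seção [Alertas]."""
--     if not isinstance(triagem_txt, str):
--         return False
--     sections = {}
--     current = None
--     for linha in triagem_txt.splitlines():
--         s = linha.strip()
--         if s.startswith("[") and s.endswith("]"):
--             current = s
--         else:
--             sections.setdefault(current, []).append(s)
--     return any("documentos essenciais" in l.lower()
--                for l in sections.get("[Alertas]", []))
-- ===== Notes on version B (the rewrite author's own statement) =====
-- stated objective: alternative
-- what changed: B parses the text into a dict of section-name -> body lines in one pass and then queries the accumulated '[Alertas]' body with any(), instead of A's interleaved boolean state tracking with early return.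
import Mathlib
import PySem

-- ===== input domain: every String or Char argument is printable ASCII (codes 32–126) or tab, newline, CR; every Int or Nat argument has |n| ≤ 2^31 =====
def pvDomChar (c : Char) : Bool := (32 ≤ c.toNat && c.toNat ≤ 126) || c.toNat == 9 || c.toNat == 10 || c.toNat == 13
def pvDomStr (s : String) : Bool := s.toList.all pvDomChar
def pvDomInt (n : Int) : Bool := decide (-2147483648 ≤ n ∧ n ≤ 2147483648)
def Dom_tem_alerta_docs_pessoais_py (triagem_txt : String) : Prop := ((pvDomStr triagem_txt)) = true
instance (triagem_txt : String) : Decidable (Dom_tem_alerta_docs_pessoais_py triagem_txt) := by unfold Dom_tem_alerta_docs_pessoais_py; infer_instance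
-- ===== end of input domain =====

-- One honest line: B parses the text into a dict section-header -> body lines and then
-- queries the '[Alertas]' entry, instead of A's interleaved flag tracking with early return.

-- ===== PORT A =====
-- the loop over splitlines with the in_alertas flag and the early return
def pvALoop (lines : List String) (inAlertas : Bool) : Bool :=
  match lines with
  | [] => false
  | linha :: rest =>
    let s := PySem.Str.strip linha
    if s == "[Alertas]" then pvALoop rest true
    else
      let inA := if PySem.Str.startswith s "[" && PySem.Str.endswith s "]" && !(s == "[Alertas]")
                 then false else inAlertas
      if inA && PySem.Str.isIn "documentos essenciais" (PySem.Str.lower s) then true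
      else pvALoop rest inA

def tem_alerta_docs_pessoais_py (triagem_txt : String) : Bool :=
  pvALoop (PySem.Str.splitlines triagem_txt) false

-- ===== PORT B =====
-- first pass: build sections : Dict (Option String) (List String) with setdefault/append
def pvBBuild (lines : List String) (current : Option String)
    (sections : PySem.Dict (Option String) (List String)) :
    PySem.Dict (Option String) (List String) :=
  match lines with
  | [] => sections
  | linha :: rest =>
    let s := PySem.Str.strip linha
    if PySem.Str.startswith s "[" && PySem.Str.endswith s "]" then
      pvBBuild rest (some s) sections
    else
      pvBBuild rest current (sections.modify current [] (· ++ [s]))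

def tem_alerta_docs_pessoais_py_alt (triagem_txt : String) : Bool :=
  let sections := pvBBuild (PySem.Str.splitlines triagem_txt) none PySem.Dict.empty
  (sections.getD (some "[Alertas]") []).any
    (fun l => PySem.Str.isIn "documentos essenciais" (PySem.Str.lower l))

-- ===== PRECONDITION & SPEC =====
def Spec_tem_alerta_docs_pessoais_py (triagem_txt : String) (out : Bool) : Prop := out = tem_alerta_docs_pessoais_py_alt triagem_txt
instance (triagem_txt : String) (out : Bool) : Decidable (Spec_tem_alerta_docs_pessoais_py triagem_txt out) := by unfold Spec_tem_alerta_docs_pessoais_py; infer_instance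

-- ===== CLAIM (what is proved, stated in full; the proofs are below) =====
def Claim_equal_tem_alerta_docs_pessoais_py : Prop := ∀ (triagem_txt : String), Dom_tem_alerta_docs_pessoais_py triagem_txt → Spec_tem_alerta_docs_pessoais_py triagem_txt (tem_alerta_docs_pessoais_py triagem_txt)

-- ===== LEMMAS AND PROOFS =====

-- the body lines of '[Alertas]' sections, collected directly (proof-side reference)
def pvCollect (lines : List String) (cur : Option String) : List String :=
  match lines with
  | [] => []
  | linha :: rest =>
    let s := PySem.Str.strip linha
    if PySem.Str.startswith s "[" && PySem.Str.endswith s "]" then pvCollect rest (some s)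
    else (if cur == some "[Alertas]" then [s] else []) ++ pvCollect rest cur

def pvP (s : String) : Bool := PySem.Str.isIn "documentos essenciais" (PySem.Str.lower s)

-- A's loop is 'any pvP' over the collected body lines
theorem pvALoop_eq_any (lines : List String) (cur : Option String) :
    pvALoop lines (cur == some "[Alertas]") = (pvCollect lines cur).any pvP := by
  induction lines generalizing cur with
  | nil => simp [pvALoop, pvCollect]
  | cons linha rest ih =>
    simp only [pvALoop, pvCollect]
    by_cases hA : PySem.Str.strip linha = "[Alertas]"
    · have hb : (PySem.Str.strip linha == "[Alertas]") = true := by rw [hA]; decide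
      have hhd : (PySem.Str.startswith (PySem.Str.strip linha) "[" &&
          PySem.Str.endswith (PySem.Str.strip linha) "]") = true := by rw [hA]; decide
      rw [if_pos hb, if_pos hhd, hA]
      have := ih (some "[Alertas]")
      rw [show ((some "[Alertas]" : Option String) == some "[Alertas]") = true from by decide] at this
      exact this
    · have hne : (PySem.Str.strip linha == "[Alertas]") = false := by
        simpa using hA
      rw [if_neg (by rw [hne]; exact Bool.false_ne_true)]
      simp only [hne, Bool.not_false, Bool.and_true]
      by_cases hhd : (PySem.Str.startswith (PySem.Str.strip linha) "[" &&
          PySem.Str.endswith (PySem.Str.strip linha) "]") = true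
      · rw [if_pos hhd, if_pos hhd]
        simp only [Bool.false_and, Bool.false_eq_true, if_false]
        have hcur : ((some (PySem.Str.strip linha) : Option String) == some "[Alertas]") = false := by
          simpa using hA
        have := ih (some (PySem.Str.strip linha))
        rw [hcur] at this
        exact this
      · rw [if_neg hhd, if_neg hhd]
        cases hc : (cur == some "[Alertas]") with
        | true =>
          have h2 := ih cur
          rw [hc] at h2
          simp only [Bool.true_and, eq_self_iff_true, if_true, List.any_append, List.any_cons,
            List.any_nil, Bool.or_false, h2, pvP]
          cases hp : PySem.Str.isIn "documentos essenciais"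
              (PySem.Str.lower (PySem.Str.strip linha)) with
          | true => simp only [hp, if_true, Bool.true_or]
          | false => simp only [hp, Bool.false_eq_true, if_false, Bool.false_or]
        | false =>
          simp only [Bool.false_and, Bool.false_eq_true, if_false, List.nil_append]
          have h2 := ih cur
          rw [hc] at h2
          exact h2
  termination_by lines.length

-- B's dict fold appends exactly the collected body lines under the '[Alertas]' key
theorem pvBBuild_getD (lines : List String) (cur : Option String)
    (d : PySem.Dict (Option String) (List String)) :
    (pvBBuild lines cur d).getD (some "[Alertas]") [] =
      d.getD (some "[Alertas]") [] ++ pvCollect lines cur := by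
  induction lines generalizing cur d with
  | nil => simp [pvBBuild, pvCollect]
  | cons linha rest ih =>
    simp only [pvBBuild, pvCollect]
    by_cases hhd : (PySem.Str.startswith (PySem.Str.strip linha) "[" &&
        PySem.Str.endswith (PySem.Str.strip linha) "]") = true
    · rw [if_pos hhd, if_pos hhd]
      exact ih _ _
    · simp only [Bool.not_eq_true] at hhd
      simp only [hhd, Bool.false_eq_true, if_false]
      rw [ih]
      rw [PySem.Dict.getD_modify]
      by_cases hc : (some "[Alertas]" : Option String) = cur
      · simp [hc, List.append_assoc]
      · have hc' : (cur == some "[Alertas]") = false :=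
          beq_eq_false_iff_ne.mpr (fun h => hc h.symm)
        simp [hc, hc']
  termination_by lines.length

-- ===== VERDICT (by name: the statement is the Claim_ definition above) =====
theorem tem_alerta_docs_pessoais_py_spec : Claim_equal_tem_alerta_docs_pessoais_py := by
  intro t _
  unfold Spec_tem_alerta_docs_pessoais_py tem_alerta_docs_pessoais_py tem_alerta_docs_pessoais_py_alt
  have hA := pvALoop_eq_any (PySem.Str.splitlines t) none
  simp only [show ((none : Option String) == some "[Alertas]") = false from rfl] at hA
  rw [hA]
  simp only [pvBBuild_getD, PySem.Dict.getD_empty, List.nil_append]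
  unfold pvP
  simp
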